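-- pv_equiv track=rewrite | github.com/miladallahgholi95/irhooshyar_api | irhooshyar_api/views.py | process_agg
-- ===== SOURCE A (Python) =====
-- def process_agg(data):
--     keys = [d["key"] for d in data if d["key"] != 0]
--     if len(keys) == 0:
--         return []
--
--     min_key = min(keys)
--     max_key = max(keys)
--
--     sorted_keys = list(range(min_key, max_key + 1))
--
--     result = []
--     key_to_doc_count = {d["key"]: d["doc_count"] for d in data}
--
--     for key in sorted_keys:
--         doc_count = key_to_doc_count.get(key, 0)
--         result.append({"key": key, "doc_count": doc_count})
--
--     return result
-- ===== SOURCE B (Python) =====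
-- def process_agg(data):
--     keys = [d["key"] for d in data if d["key"] != 0]
--     if len(keys) == 0:
--         return []
--
--     min_key = min(keys)
--     max_key = max(keys)
--
--     # Preallocate one slot per key in the dense range, then scatter the
--     # doc_counts positionally in a single pass over the original data
--     # (later duplicates overwrite earlier ones, like the dict build in A).
--     result = [{"key": k, "doc_count": 0} for k in range(min_key, max_key + 1)]
--     for d in data:
--         k = d["key"]
--         if min_key <= k <= max_key:
--             result[k - min_key] = {"key": k, "doc_count": d["doc_count"]}
--     return result
-- ===== Notes on version B (the rewrite author's own statement) =====
-- stated objective: alternative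
-- what changed: Instead of building a key->doc_count dict and gathering a lookup for every key of the dense range, B preallocates the range as a positional array and scatters each data entry into result[key - min_key] in one pass over data.
import Mathlib
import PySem

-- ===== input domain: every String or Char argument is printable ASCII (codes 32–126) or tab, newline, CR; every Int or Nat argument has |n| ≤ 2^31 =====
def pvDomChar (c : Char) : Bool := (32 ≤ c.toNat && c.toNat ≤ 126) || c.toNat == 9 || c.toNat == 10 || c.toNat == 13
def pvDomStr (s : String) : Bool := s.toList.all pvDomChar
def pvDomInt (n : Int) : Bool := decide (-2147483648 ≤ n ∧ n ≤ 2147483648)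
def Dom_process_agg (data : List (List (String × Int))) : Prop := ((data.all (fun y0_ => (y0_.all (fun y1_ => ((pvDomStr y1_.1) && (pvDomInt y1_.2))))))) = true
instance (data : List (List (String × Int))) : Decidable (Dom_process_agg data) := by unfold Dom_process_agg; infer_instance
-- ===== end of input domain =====

-- B replaces A's dict-build + gather-over-the-range with a preallocated dense array
-- that a single pass over the data scatters into (alternative decomposition, same cost).


-- ===== PORT A =====
-- d["key"] / d["doc_count"]: Pre_ guarantees the key is present, so the getD default is never used
-- (Python raises KeyError exactly on the inputs Pre_ excludes).
def pvKey (d : List (String × Int)) : Int := (PySem.Dict.mk d).getD "key" 0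
def pvDoc (d : List (String × Int)) : Int := (PySem.Dict.mk d).getD "doc_count" 0

def process_agg (data : List (List (String × Int))) : List (List (String × Int)) :=
  let keys := (data.filter (fun d => pvKey d ≠ 0)).map pvKey
  if keys = [] then []
  else
    match PySem.List.min? keys (fun x => x), PySem.List.max? keys (fun x => x) with
    | some min_key, some max_key =>
      let sorted_keys := PySem.List.pyRange min_key (max_key + 1) 1
      let key_to_doc_count :=
        data.foldl (fun acc d => acc.insert (pvKey d) (pvDoc d)) (PySem.Dict.empty : PySem.Dict Int Int)
      sorted_keys.foldl
        (fun result key => result ++ [[("key", key), ("doc_count", key_to_doc_count.getD key 0)]]) []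
    | _, _ => []

-- ===== PORT B =====
def process_agg_alt (data : List (List (String × Int))) : List (List (String × Int)) :=
  let keys := (data.filter (fun d => pvKey d ≠ 0)).map pvKey
  if keys = [] then []
  else
    match PySem.List.min? keys (fun x => x) with
    | none => []
    | some min_key =>
      match PySem.List.max? keys (fun x => x) with
      | none => []
      | some max_key =>
        let result :=
          (PySem.List.pyRange min_key (max_key + 1) 1).map (fun k => [("key", k), ("doc_count", (0 : Int))])
        data.foldl
          (fun res d =>
            if min_key ≤ pvKey d ∧ pvKey d ≤ max_key then
              res.set (pvKey d - min_key).toNat [("key", pvKey d), ("doc_count", pvDoc d)]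
            else res)
          result

-- ===== PRECONDITION & SPEC =====
-- Pre_ excludes exactly the inputs on which Python A raises KeyError: some entry lacks "key",
-- or some entry lacks "doc_count" while a nonzero key exists (otherwise A returns [] before reading "doc_count").
def Pre_process_agg (data : List (List (String × Int))) : Prop :=
  (∀ d ∈ data, "key" ∈ d.map Prod.fst) ∧
  ((∃ d ∈ data, pvKey d ≠ 0) → ∀ d ∈ data, "doc_count" ∈ d.map Prod.fst)
instance (data : List (List (String × Int))) : Decidable (Pre_process_agg data) := by
  unfold Pre_process_agg; infer_instance
def pvWitness_process_agg : (List (List (String × Int))) :=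
  [[("key", 2), ("doc_count", 5)], [("key", 4), ("doc_count", 1)]]

def Spec_process_agg (data : List (List (String × Int))) (out : List (List (String × Int))) : Prop := out = process_agg_alt data
instance (data : List (List (String × Int))) (out : List (List (String × Int))) : Decidable (Spec_process_agg data out) := by unfold Spec_process_agg; infer_instance

-- ===== CLAIM (what is proved, stated in full; the proofs are below) =====
def Claim_equal_process_agg : Prop := ∀ (data : List (List (String × Int))), Dom_process_agg data → Pre_process_agg data → Spec_process_agg data (process_agg data)

-- ===== LEMMAS AND PROOFS =====

-- One scatter step on the fully-shaped range array equals one dict insert on the gather side.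
lemma step_eq (mn mx k v : Int) (acc : PySem.Dict Int Int) :
    (if mn ≤ k ∧ k ≤ mx then
        ((PySem.List.pyRange mn (mx + 1) 1).map
          (fun j => [("key", j), ("doc_count", acc.getD j 0)])).set
          (k - mn).toNat [("key", k), ("doc_count", v)]
      else
        (PySem.List.pyRange mn (mx + 1) 1).map
          (fun j => [("key", j), ("doc_count", acc.getD j 0)]))
    = (PySem.List.pyRange mn (mx + 1) 1).map
        (fun j => [("key", j), ("doc_count", (acc.insert k v).getD j 0)]) := by
  by_cases h : mn ≤ k ∧ k ≤ mx
  · simp only [if_pos h]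
    apply List.ext_getElem
    · simp
    · intro i h1 h2
      simp only [List.length_map, PySem.List.length_pyRange_one] at h2
      have hik : (k - mn).toNat = i ↔ mn + (i : Int) = k := by omega
      rw [List.getElem_set]
      by_cases hi : (k - mn).toNat = i
      · simp only [if_pos hi, List.getElem_map, PySem.List.getElem_pyRange_one,
          PySem.Dict.getD_insert, hik.mp hi]
        simp
      · simp only [if_neg hi, List.getElem_map, PySem.List.getElem_pyRange_one,
          PySem.Dict.getD_insert]
        rw [if_neg (fun hc => hi (hik.mpr hc))]
  · simp only [if_neg h]
    apply List.map_congr_left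
    intro j hj
    rw [PySem.List.mem_pyRange_one] at hj
    have hne : j ≠ k := by omega
    rw [PySem.Dict.getD_insert, if_neg hne]

-- The scatter loop over data maintains the gather-shaped array as an invariant.
lemma scatter_eq (mn mx : Int) (data : List (List (String × Int))) (acc : PySem.Dict Int Int) :
    data.foldl
      (fun res d =>
        if mn ≤ pvKey d ∧ pvKey d ≤ mx then
          res.set (pvKey d - mn).toNat [("key", pvKey d), ("doc_count", pvDoc d)]
        else res)
      ((PySem.List.pyRange mn (mx + 1) 1).map
        (fun j => [("key", j), ("doc_count", acc.getD j 0)]))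
    = (PySem.List.pyRange mn (mx + 1) 1).map
        (fun j => [("key", j),
          ("doc_count", (data.foldl (fun a d => a.insert (pvKey d) (pvDoc d)) acc).getD j 0)]) := by
  induction data generalizing acc with
  | nil => rfl
  | cons d t ih =>
    simp only [List.foldl_cons]
    rw [step_eq mn mx (pvKey d) (pvDoc d) acc]
    exact ih (acc.insert (pvKey d) (pvDoc d))

theorem process_agg_eq (data : List (List (String × Int))) :
    process_agg data = process_agg_alt data := by
  unfold process_agg process_agg_alt
  by_cases hk : (data.filter (fun d => pvKey d ≠ 0)).map pvKey = []
  · simp only [if_pos hk]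
  · simp only [if_neg hk]
    cases hmin : PySem.List.min? ((data.filter (fun d => pvKey d ≠ 0)).map pvKey) (fun x => x) with
    | none => rfl
    | some mn =>
      cases hmax : PySem.List.max? ((data.filter (fun d => pvKey d ≠ 0)).map pvKey) (fun x => x) with
      | none => rfl
      | some mx =>
        simp only []
        rw [PySem.List.foldl_append_singleton_eq_map, List.nil_append]
        have hinit : (PySem.List.pyRange mn (mx + 1) 1).map
            (fun k => [("key", k), ("doc_count", (0 : Int))])
            = (PySem.List.pyRange mn (mx + 1) 1).map
            (fun j => [("key", j), ("doc_count", (PySem.Dict.empty : PySem.Dict Int Int).getD j 0)]) := rfl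
        rw [hinit]
        exact (scatter_eq mn mx data PySem.Dict.empty).symm

-- ===== VERDICT (by name: the statement is the Claim_ definition above) =====
theorem process_agg_spec : Claim_equal_process_agg := by
  intro data _ _
  unfold Spec_process_agg
  exact process_agg_eq data
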